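-- pv_equiv track=rewrite | github.com/saraazevedolopes/PL2025 | TPC1/tpc1.py | somador_on_off
-- ===== SOURCE A (Python) =====
-- def somador_on_off(texto):
--     soma = 0
--     ligado = True  # O somador começa ligado por defeito
--     resultado = []
--
--     i = 0
--     while i < len(texto):
--         if texto[i:i+2].lower() == "on":
--             ligado = True
--             i += 2  # Avança para depois do "on"
--         elif texto[i:i+3].lower() == "off":
--             ligado = False
--             i += 3  # Avança para depois do "off"
--         elif texto[i] == "=":
--             # Regista o resultado actual sem reiniciar a soma
--             resultado.append(soma)
--             i += 1
--         elif texto[i].isdigit() and ligado: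
--             # Adiciona o número à soma se o somador estiver ligado
--             start = i
--             while i < len(texto) and texto[i].isdigit():
--                 i += 1
--             soma += int(texto[start:i])
--         else:
--             # Avança se o carácter não for relevante
--             i += 1
--
--     return resultado
-- ===== SOURCE B (Python) =====
-- def somador_on_off(texto):
--     # Tokenize first: keywords, '=', and maximal digit runs; then fold.
--     tokens = []
--     i, n = 0, len(texto)
--     while i < n:
--         if texto[i:i+2].lower() == "on":
--             tokens.append(("on", ""))
--             i += 2
--         elif texto[i:i+3].lower() == "off":
--             tokens.append(("off", ""))
--             i += 3
--         elif texto[i] == "=":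
--             tokens.append(("eq", ""))
--             i += 1
--         elif texto[i].isdigit():
--             j = i
--             while j < n and texto[j].isdigit():
--                 j += 1
--             tokens.append(("num", texto[i:j]))
--             i = j
--         else:
--             i += 1
--     resultado = []
--     soma = 0
--     ligado = True
--     for kind, val in tokens:
--         if kind == "on":
--             ligado = True
--         elif kind == "off":
--             ligado = False
--         elif kind == "eq":
--             resultado.append(soma)
--         elif ligado:
--             soma += int(val)
--     return resultado
-- ===== Notes on version B (the rewrite author's own statement) =====
-- stated objective: alternative
-- what changed: A's single while-loop that interleaves scanning and summing is split into two phases: a tokenizer that turns the text into a list of tokens (on/off keywords, '=', maximal digit runs) and a separate fold over the token list that maintains the on/off state and records sums.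
import Mathlib
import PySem

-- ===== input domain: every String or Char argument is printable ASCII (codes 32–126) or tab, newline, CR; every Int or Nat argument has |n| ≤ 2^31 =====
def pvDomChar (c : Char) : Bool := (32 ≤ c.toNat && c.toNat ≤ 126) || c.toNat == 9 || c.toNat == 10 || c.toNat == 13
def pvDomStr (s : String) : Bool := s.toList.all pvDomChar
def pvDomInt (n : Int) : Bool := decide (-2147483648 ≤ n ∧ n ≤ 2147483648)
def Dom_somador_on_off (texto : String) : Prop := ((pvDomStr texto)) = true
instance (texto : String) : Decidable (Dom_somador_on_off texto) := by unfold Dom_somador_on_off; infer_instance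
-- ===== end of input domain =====

-- B splits A's single while-loop into a tokenization pass plus a fold over the tokens (objective: alternative decomposition; same cost).

-- ===== PORT A =====
-- int(texto[start:i]) is ported as (PySem.Int.ofChars? run).getD 0; exact here because the run is a nonempty all-digit string, so ofChars? is always `some`.
def somadorLoopA : List Char → Int → Bool → List Int → List Int
  | [], _, _, res => res
  | c :: rest, soma, ligado, res =>
    if PySem.Chars.lower ((c :: rest).take 2) = ['o', 'n'] then
      somadorLoopA rest.tail soma true res
    else if PySem.Chars.lower ((c :: rest).take 3) = ['o', 'f', 'f'] then
      somadorLoopA (rest.drop 2) soma false res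
    else if c = '=' then
      somadorLoopA rest soma ligado (res ++ [soma])
    else if PySem.Chars.isdigit c && ligado then
      somadorLoopA (rest.dropWhile PySem.Chars.isdigit) (soma + (PySem.Int.ofChars? (c :: rest.takeWhile PySem.Chars.isdigit)).getD 0) ligado res
    else
      somadorLoopA rest soma ligado res
  termination_by cs _ _ _ => cs.length
  decreasing_by
  all_goals (have := List.length_dropWhile_le (p := PySem.Chars.isdigit) (l := rest);
             simp_all [List.length_tail]; try omega)

def somador_on_off (texto : String) : List Int :=
  somadorLoopA texto.toList 0 true []

-- ===== PORT B =====
inductive PvTok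
  | kwOn : PvTok
  | kwOff : PvTok
  | eq : PvTok
  | num : List Char → PvTok
  deriving DecidableEq, Repr

def somadorTokenize : List Char → List PvTok
  | [] => []
  | c :: rest =>
    if PySem.Chars.lower ((c :: rest).take 2) = ['o', 'n'] then
      PvTok.kwOn :: somadorTokenize rest.tail
    else if PySem.Chars.lower ((c :: rest).take 3) = ['o', 'f', 'f'] then
      PvTok.kwOff :: somadorTokenize (rest.drop 2)
    else if c = '=' then
      PvTok.eq :: somadorTokenize rest
    else if PySem.Chars.isdigit c then
      PvTok.num (c :: rest.takeWhile PySem.Chars.isdigit) :: somadorTokenize (rest.dropWhile PySem.Chars.isdigit)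
    else
      somadorTokenize rest
  termination_by cs => cs.length
  decreasing_by
  all_goals (have := List.length_dropWhile_le (p := PySem.Chars.isdigit) (l := rest);
             simp_all [List.length_tail]; try omega)

-- int(val) is ported as (PySem.Int.ofChars? run).getD 0; exact because every num token is a nonempty all-digit run.
def somadorFold : List PvTok → Int → Bool → List Int
  | [], _, _ => []
  | PvTok.kwOn :: ts, soma, _ => somadorFold ts soma true
  | PvTok.kwOff :: ts, soma, _ => somadorFold ts soma false
  | PvTok.eq :: ts, soma, ligado => soma :: somadorFold ts soma ligado
  | PvTok.num run :: ts, soma, ligado =>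
      somadorFold ts (if ligado then soma + (PySem.Int.ofChars? run).getD 0 else soma) ligado

def somador_on_off_alt (texto : String) : List Int :=
  somadorFold (somadorTokenize texto.toList) 0 true

-- ===== PRECONDITION & SPEC =====
def Spec_somador_on_off (texto : String) (out : List Int) : Prop := out = somador_on_off_alt texto
instance (texto : String) (out : List Int) : Decidable (Spec_somador_on_off texto out) := by unfold Spec_somador_on_off; infer_instance

-- ===== CLAIM (what is proved, stated in full; the proofs are below) =====
def Claim_equal_somador_on_off : Prop := ∀ (texto : String), Dom_somador_on_off texto → Spec_somador_on_off texto (somador_on_off texto)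

-- ===== LEMMAS AND PROOFS =====

-- A digit character is not lowered to 'o' and is not '=' (so a digit never starts a keyword or '=').
theorem pv_digit_not_o (c : Char) (h : PySem.Chars.isdigit c = true) :
    PySem.Chars.lowerChar c ≠ 'o' := by
  intro hc
  simp [PySem.Chars.isdigit, Char.le_def, UInt32.le_iff_toNat_le] at h
  have hu : PySem.Chars.isupper c = false := by
    simp [PySem.Chars.isupper, Char.le_def, UInt32.le_iff_toNat_le]
    intro h1
    omega
  simp [PySem.Chars.lowerChar, hu] at hc
  rw [hc] at h
  simp at h

theorem pv_digit_not_eq (c : Char) (h : PySem.Chars.isdigit c = true) : c ≠ '=' := by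
  intro hc
  rw [hc] at h
  simp [PySem.Chars.isdigit] at h

-- On a digit head, the tokenizer takes its digit branch.
theorem pv_tokenize_digit (c : Char) (rest : List Char) (hd : PySem.Chars.isdigit c = true) :
    somadorTokenize (c :: rest)
      = PvTok.num (c :: rest.takeWhile PySem.Chars.isdigit)
          :: somadorTokenize (rest.dropWhile PySem.Chars.isdigit) := by
  rw [somadorTokenize]
  simp [PySem.Chars.lower, pv_digit_not_o c hd, pv_digit_not_eq c hd, hd]

-- When the somador is off, a leading digit run contributes nothing to the fold.
theorem pv_fold_skip_digits (cs : List Char) (soma : Int) :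
    somadorFold (somadorTokenize cs) soma false
      = somadorFold (somadorTokenize (cs.dropWhile PySem.Chars.isdigit)) soma false := by
  cases cs with
  | nil => rfl
  | cons c rest =>
    by_cases hd : PySem.Chars.isdigit c = true
    · rw [pv_tokenize_digit c rest hd]
      simp [somadorFold, hd]
    · simp at hd
      simp [hd]

theorem pv_loopA_eq_fold (cs : List Char) (soma : Int) (ligado : Bool) (res : List Int) :
    somadorLoopA cs soma ligado res = res ++ somadorFold (somadorTokenize cs) soma ligado := by
  fun_induction somadorLoopA cs soma ligado res with
  | case1 => simp [somadorTokenize, somadorFold]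
  | case2 c rest soma ligado res h1 ih =>
    rw [somadorTokenize]
    simp only [h1, if_pos]
    simpa [somadorFold] using ih
  | case3 c rest soma ligado res h1 h2 ih =>
    rw [somadorTokenize]
    simp only [h1, h2, if_neg, if_pos, not_false_iff]
    simpa [somadorFold] using ih
  | case4 rest soma ligado res h1 h2 ih =>
    rw [somadorTokenize]
    simp only [h1, h2, if_neg, not_false_iff]
    simp [somadorFold, ih]
  | case5 c rest soma ligado res h1 h2 h3 h4 ih =>
    have hd : PySem.Chars.isdigit c = true := by
      cases hdd : PySem.Chars.isdigit c <;> simp [hdd] at h4 ⊢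
    have hl : ligado = true := by
      cases hll : ligado <;> simp [hll] at h4 ⊢
    subst hl
    rw [somadorTokenize]
    simp only [h1, h2, h3, hd, if_neg, if_pos, not_false_iff]
    simpa [somadorFold] using ih
  | case6 c rest soma ligado res h1 h2 h3 h4 ih =>
    by_cases hd : PySem.Chars.isdigit c = true
    · have hl : ligado = false := by
        cases hll : ligado
        · rfl
        · rw [hll] at h4; simp [hd] at h4
      subst hl
      rw [pv_tokenize_digit c rest hd]
      rw [ih]
      simp [somadorFold, pv_fold_skip_digits rest soma]
    · simp at hd
      rw [somadorTokenize]
      simp only [h1, h2, h3, hd, if_neg, not_false_iff]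
      simp [ih]

-- ===== VERDICT (by name: the statement is the Claim_ definition above) =====
theorem somador_on_off_spec : Claim_equal_somador_on_off := by
  intro texto _
  unfold Spec_somador_on_off somador_on_off somador_on_off_alt
  simpa using pv_loopA_eq_fold texto.toList 0 true []
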